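-- pv_equiv track=rewrite | github.com/Arpit599/Data-Structures-with-Python | Arrays/Basic/pendulumArr.py | pendulumArrangement
-- ===== SOURCE A (Python) =====
-- def pendulumArrangement(arr, n):
--
--     arr.sort()
--     tempArr = arr.copy()
--
--     #Starting index for left part
--     indexL = 0
--     #Starting index for right part
--     indexR = 1
--
--     #For making left part
--     for i in range(int((n-1)/2), -1 , -1):
--         arr[i] = tempArr[indexL]
--         indexL += 2
--
--     #For making right part
--     for i in range(int((n-1)/2) + 1, n):
--         arr[i] = tempArr[indexR]
--         indexR += 2
--
--     return arr
-- ===== SOURCE B (Python) =====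
-- def pendulumArrangement(arr, n):
--     arr.sort()
--     m = max(n, 0)
--     head = arr[:m]
--     left, right = [], []
--     for i, x in enumerate(head):
--         if i % 2 == 0:
--             left.append(x)
--         else:
--             right.append(x)
--     arr[:m] = left[::-1] + right
--     return arr
-- ===== Notes on version B (the rewrite author's own statement) =====
-- stated objective: simpler
-- what changed: A fills positions mid..0 and mid+1..n-1 with two stride-2 index-write loops over a copy; B makes one pass over the sorted prefix partitioning elements by index parity into left/right lists and writes back reversed-left + right.
import Mathlib
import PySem

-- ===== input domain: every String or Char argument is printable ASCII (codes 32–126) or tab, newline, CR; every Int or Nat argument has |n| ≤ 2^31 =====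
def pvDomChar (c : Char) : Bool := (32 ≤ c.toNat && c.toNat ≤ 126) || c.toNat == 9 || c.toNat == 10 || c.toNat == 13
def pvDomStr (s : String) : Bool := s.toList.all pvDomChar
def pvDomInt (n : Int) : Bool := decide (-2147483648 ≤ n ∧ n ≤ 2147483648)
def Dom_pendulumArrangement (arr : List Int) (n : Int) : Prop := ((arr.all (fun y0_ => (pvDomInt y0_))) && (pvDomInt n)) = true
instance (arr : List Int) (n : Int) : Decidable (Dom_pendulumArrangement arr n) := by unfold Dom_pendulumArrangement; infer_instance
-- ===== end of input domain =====

-- B replaces A's two stride-2 index-write loops by a single parity partition pass plus a reverse;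
-- both A and B mutate the Python argument list in place (equivalence proved about the return value).

-- ===== PORT A =====
-- one loop body 'arr[i] = tempArr[index]; index += 2'; first component none = IndexError already raised (absorbing)
def pvWrite (tempArr : List Int) (st : Option (List Int) × Int) (i : Int) : Option (List Int) × Int :=
  match st with
  | (none, c) => (none, c + 2)
  | (some a, c) =>
    match PySem.List.pyGet? tempArr c with
    | none => (none, c + 2)
    | some v => (PySem.List.pySet? a i v, c + 2)

def pendulumArrangement (arr : List Int) (n : Int) : List Int :=
  let s := PySem.List.sorted arr (fun x => x) false
  let tempArr := s
  -- int((n-1)/2): exact truncating division for the |n| ≤ 2^31 domain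
  let mid := PySem.Int.truncdiv (n - 1) 2
  let st1 := (PySem.List.pyRange mid (-1) (-1)).foldl (pvWrite tempArr) (some s, 0)
  let st2 := (PySem.List.pyRange (mid + 1) n 1).foldl (pvWrite tempArr) (st1.1, 1)
  (st2.1).getD []   -- total form; Pre_ excludes exactly the IndexError inputs (none)

-- ===== PORT B =====
-- loop body: append x to left when i is even, to right when i is odd
def pvPart (lr : List Int × List Int) (p : Int × Int) : List Int × List Int :=
  if PySem.Int.mod p.1 2 = 0 then (lr.1 ++ [p.2], lr.2) else (lr.1, lr.2 ++ [p.2])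

def pendulumArrangement_alt (arr : List Int) (n : Int) : List Int :=
  let s := PySem.List.sorted arr (fun x => x) false
  let m := max n 0
  let head := PySem.List.slice s none (some m)
  let lr := (PySem.List.enumerate head 0).foldl pvPart ([], [])
  ((PySem.List.slice? lr.1 none none (-1)).getD []) ++ lr.2 ++ PySem.List.slice s (some m) none

-- ===== PRECONDITION & SPEC =====
-- Pre_ excludes exactly the IndexError inputs of A: n > len(arr), and n = 0 with arr = []
def Pre_pendulumArrangement (arr : List Int) (n : Int) : Prop :=
  n ≤ (arr.length : Int) ∧ (n = 0 → arr ≠ [])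
instance (arr : List Int) (n : Int) : Decidable (Pre_pendulumArrangement arr n) := by unfold Pre_pendulumArrangement; infer_instance
def pvWitness_pendulumArrangement : List Int × Int := ([3, 1, 2, 5, 4], 5)

def Spec_pendulumArrangement (arr : List Int) (n : Int) (out : List Int) : Prop := out = pendulumArrangement_alt arr n
instance (arr : List Int) (n : Int) (out : List Int) : Decidable (Spec_pendulumArrangement arr n out) := by unfold Spec_pendulumArrangement; infer_instance

-- ===== CLAIM (what is proved, stated in full; the proofs are below) =====
def Claim_equal_pendulumArrangement : Prop := ∀ (arr : List Int) (n : Int), Dom_pendulumArrangement arr n → Pre_pendulumArrangement arr n → Spec_pendulumArrangement arr n (pendulumArrangement arr n)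

-- ===== LEMMAS AND PROOFS =====

-- elements of xs at even / odd positions, in order (proof-only characterisation of B's partition pass)
def pvEvens : List Int → List Int
  | [] => []
  | [x] => [x]
  | x :: _ :: xs => x :: pvEvens xs

def pvOdds : List Int → List Int
  | [] => []
  | [_] => []
  | _ :: y :: xs => y :: pvOdds xs

lemma pvWrite_step (temp a : List Int) (i c v : Int) (h : PySem.List.pyGet? temp c = some v) :
    pvWrite temp (some a, c) i = (PySem.List.pySet? a i v, c + 2) := by
  simp [pvWrite, h]

lemma pv_foldB : ∀ (xs : List Int) (c : Int) (l r : List Int), 0 ≤ c → c % 2 = 0 →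
    (PySem.List.enumerate xs c).foldl pvPart (l, r) = (l ++ pvEvens xs, r ++ pvOdds xs) := by
  intro xs
  induction xs using pvEvens.induct with
  | case1 =>
    intro c l r _ _
    simp [PySem.List.enumerate_nil, pvEvens, pvOdds]
  | case2 x =>
    intro c l r hc h
    rw [PySem.List.enumerate_cons, PySem.List.enumerate_nil]
    simp only [List.foldl_cons, List.foldl_nil]
    rw [show pvPart (l, r) (c, x) = (l ++ [x], r) from by
      simp [pvPart, h]]
    simp [pvEvens, pvOdds]
  | case3 x y xs ih =>
    intro c l r hc h
    simp only [PySem.List.enumerate_cons, List.foldl_cons]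
    rw [show pvPart (l, r) (c, x) = (l ++ [x], r) from by
      simp [pvPart, h]]
    rw [show pvPart (l ++ [x], r) (c + 1, y) = (l ++ [x], r ++ [y]) from by
      simp [pvPart]
      omega]
    rw [ih (c + 1 + 1) (l ++ [x]) (r ++ [y]) (by omega) (by omega)]
    simp [pvEvens, pvOdds]

lemma pv_evens_eq : ∀ (h : List Int),
    pvEvens h = (List.range ((h.length + 1) / 2)).map (fun j => h.getD (2 * j) 0) := by
  intro h
  induction h using pvEvens.induct with
  | case1 => simp [pvEvens]
  | case2 x => simp [pvEvens]
  | case3 x y xs ih =>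
    have h2 : ((x :: y :: xs).length + 1) / 2 = (xs.length + 1) / 2 + 1 := by
      simp only [List.length_cons]
      omega
    rw [show pvEvens (x :: y :: xs) = x :: pvEvens xs from rfl, ih, h2,
        List.range_succ_eq_map, List.map_cons, List.map_map]
    refine congrArg₂ List.cons ?_ ?_
    · simp
    · apply List.map_congr_left
      intro j _
      show xs.getD (2 * j) 0 = (x :: y :: xs).getD (2 * (Nat.succ j)) 0
      rw [show 2 * (Nat.succ j) = (2 * j + 1) + 1 from by omega]
      simp

lemma pv_odds_eq : ∀ (h : List Int),
    pvOdds h = (List.range (h.length / 2)).map (fun j => h.getD (2 * j + 1) 0) := by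
  intro h
  induction h using pvOdds.induct with
  | case1 => simp [pvOdds]
  | case2 x => simp [pvOdds]
  | case3 x y xs ih =>
    have h2 : (x :: y :: xs).length / 2 = xs.length / 2 + 1 := by
      simp only [List.length_cons]
      omega
    rw [show pvOdds (x :: y :: xs) = y :: pvOdds xs from rfl, ih, h2,
        List.range_succ_eq_map, List.map_cons, List.map_map]
    refine congrArg₂ List.cons ?_ ?_
    · simp
    · apply List.map_congr_left
      intro j _
      show xs.getD (2 * j + 1) 0 = (x :: y :: xs).getD (2 * (Nat.succ j) + 1) 0
      rw [show 2 * (Nat.succ j) + 1 = (2 * j + 1 + 1) + 1 from by omega]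
      simp

lemma pv_getD_take (l : List Int) (k i : Nat) (d : Int) (h : i < k) :
    (l.take k).getD i d = l.getD i d := by
  simp [List.getD_eq_getElem?_getD, h]

lemma pv_rev_map_range (N : Nat) (f : Nat → Int) :
    ((List.range N).map f).reverse = (List.range N).map (fun j => f (N - 1 - j)) := by
  rw [← List.map_reverse,
      show (List.range N).reverse = (List.range N).map (fun x => N - 1 - x) from by
        rw [List.range_eq_range', List.reverse_range']
        simp [List.range_eq_range'],
      List.map_map]
  rfl

lemma pv_left (temp : List Int) : ∀ (m : Nat) (a : List Int) (c : Nat),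
    c + 2 * m < temp.length → m < a.length →
    (PySem.List.pyRange (m : Int) (-1) (-1)).foldl (pvWrite temp) (some a, (c : Int)) =
      (some ((List.range (m + 1)).map (fun j => temp.getD (c + 2 * (m - j)) 0) ++ a.drop (m + 1)),
       (c : Int) + 2 * ((m : Int) + 1)) := by
  intro m
  induction m with
  | zero =>
    intro a c h1 h2
    have hc : c < temp.length := by omega
    rw [show ((0 : Nat) : Int) = 0 from by norm_num,
        PySem.List.pyRange_neg_one_cons (by norm_num),
        show (0 : Int) - 1 = -1 from by ring,
        PySem.List.pyRange_neg_one_eq_nil le_rfl]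
    simp only [List.foldl_cons, List.foldl_nil]
    rw [pvWrite_step temp a 0 (c : Int) temp[c]
          (by rw [PySem.List.pyGet?_natCast, List.getElem?_eq_getElem hc]),
        show (0 : Int) = ((0 : Nat) : Int) from by norm_num,
        PySem.List.pySet?_natCast _ _ _ (by omega)]
    rw [List.set_eq_take_append_cons_drop]
    simp [h2, List.getD_eq_getElem?_getD, List.getElem?_eq_getElem hc]
  | succ m ih =>
    intro a c h1 h2
    have hc : c < temp.length := by omega
    rw [PySem.List.pyRange_neg_one_cons (by omega),
        show ((m + 1 : Nat) : Int) - 1 = (m : Int) from by push_cast; ring]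
    simp only [List.foldl_cons]
    rw [pvWrite_step temp a ((m + 1 : Nat) : Int) (c : Int) temp[c]
          (by rw [PySem.List.pyGet?_natCast, List.getElem?_eq_getElem hc]),
        PySem.List.pySet?_natCast _ _ _ h2]
    rw [show ((c : Int) + 2) = ((c + 2 : Nat) : Int) from by push_cast; ring]
    rw [ih (a.set (m + 1) temp[c]) (c + 2) (by omega) (by simp only [List.length_set]; omega)]
    rw [Prod.mk.injEq]
    refine ⟨?_, by push_cast; ring⟩
    congr 1
    rw [List.set_eq_take_append_cons_drop, if_pos h2,
        List.drop_left' (by simp only [List.length_take]; omega)]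
    have hmap : (List.range (m + 1)).map (fun j => temp.getD (c + 2 * (m + 1 - j)) 0)
        = (List.range (m + 1)).map (fun j => temp.getD (c + 2 + 2 * (m - j)) 0) := by
      apply List.map_congr_left
      intro j hj
      rw [List.mem_range] at hj
      rw [show c + 2 * (m + 1 - j) = c + 2 + 2 * (m - j) from by omega]
    conv_rhs => rw [List.range_succ]
    rw [List.map_append, hmap]
    simp [List.getD_eq_getElem?_getD, List.getElem?_eq_getElem hc, List.append_assoc]

lemma pv_right (temp : List Int) : ∀ (d : Nat) (lo : Nat) (a : List Int) (c : Nat),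
    c + 2 * d ≤ temp.length + 1 → lo + d ≤ a.length →
    (PySem.List.pyRange (lo : Int) ((lo : Int) + (d : Int)) 1).foldl (pvWrite temp) (some a, (c : Int)) =
      (some (a.take lo ++ (List.range d).map (fun j => temp.getD (c + 2 * j) 0) ++ a.drop (lo + d)),
       (c : Int) + 2 * (d : Int)) := by
  intro d
  induction d with
  | zero =>
    intro lo a c _ _
    rw [show ((0 : Nat) : Int) = 0 from by norm_num, PySem.List.pyRange_one_eq_nil (by omega)]
    simp [List.take_append_drop]
  | succ d ih =>
    intro lo a c h1 h2
    have hc : c < temp.length := by omega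
    have hlo : lo < a.length := by omega
    rw [PySem.List.pyRange_one_cons (by push_cast; omega)]
    simp only [List.foldl_cons]
    rw [pvWrite_step temp a ((lo : Nat) : Int) (c : Int) temp[c]
          (by rw [PySem.List.pyGet?_natCast, List.getElem?_eq_getElem hc]),
        PySem.List.pySet?_natCast _ _ _ hlo]
    rw [show ((lo : Int) + 1) = ((lo + 1 : Nat) : Int) from by push_cast; ring,
        show (lo : Int) + ((d + 1 : Nat) : Int) = ((lo + 1 : Nat) : Int) + ((d : Nat) : Int) from by push_cast; ring,
        show ((c : Int) + 2) = ((c + 2 : Nat) : Int) from by push_cast; ring]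
    rw [ih (lo + 1) (a.set lo temp[c]) (c + 2) (by omega) (by simp only [List.length_set]; omega)]
    rw [Prod.mk.injEq]
    refine ⟨?_, by push_cast; ring⟩
    congr 1
    rw [List.set_eq_take_append_cons_drop, if_pos hlo]
    have htk : ((a.take lo ++ temp[c] :: a.drop (lo + 1)).take (lo + 1))
        = a.take lo ++ [temp[c]] := by
      rw [List.take_append, show lo + 1 - (a.take lo).length = 1 from by
            simp only [List.length_take]
            omega,
          List.take_take, show min (lo + 1) lo = lo from by omega]
      simp
    have hdr : ((a.take lo ++ temp[c] :: a.drop (lo + 1)).drop (lo + 1 + d))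
        = a.drop (lo + (d + 1)) := by
      rw [List.drop_append, show lo + 1 + d - (a.take lo).length = 1 + d from by
            simp only [List.length_take]
            omega,
          List.drop_eq_nil_of_le (by simp only [List.length_take]; omega)]
      simp only [List.nil_append]
      rw [show (1 + d) = d + 1 from by omega]
      simp only [List.drop_succ_cons]
      rw [List.drop_drop]
      congr 1
      omega
    rw [htk, hdr, List.range_succ_eq_map]
    simp only [List.map_cons, List.map_map]
    have hmap : (List.range d).map ((fun j => temp.getD (c + 2 * j) 0) ∘ Nat.succ)
        = (List.range d).map (fun j => temp.getD (c + 2 + 2 * j) 0) := by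
      apply List.map_congr_left
      intro j _
      show temp.getD (c + 2 * (Nat.succ j)) 0 = temp.getD (c + 2 + 2 * j) 0
      rw [show c + 2 * (Nat.succ j) = c + 2 + 2 * j from by omega]
    rw [hmap]
    simp [List.getD_eq_getElem?_getD, List.getElem?_eq_getElem hc, List.append_assoc]

-- A's closed form for n ≥ 1 on the sorted list s (length ≥ n)
def pvE (s : List Int) (k : Nat) : List Int :=
  (List.range ((k - 1) / 2 + 1)).map (fun j => s.getD (2 * ((k - 1) / 2 - j)) 0)
def pvO (s : List Int) (k : Nat) : List Int :=
  (List.range (k - (k - 1) / 2 - 1)).map (fun j => s.getD (1 + 2 * j) 0)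

lemma pv_A_pos (arr : List Int) (n : Int) (h1 : 1 ≤ n) (h2 : n ≤ (arr.length : Int)) :
    pendulumArrangement arr n =
      pvE (PySem.List.sorted arr (fun x => x) false) n.toNat ++
      pvO (PySem.List.sorted arr (fun x => x) false) n.toNat ++
      (PySem.List.sorted arr (fun x => x) false).drop n.toNat := by
  simp only [pendulumArrangement]
  set s := PySem.List.sorted arr (fun x => x) false with hs
  have hL : s.length = arr.length := PySem.List.length_sorted arr _ _
  set k := n.toNat with hk
  have hkn : (k : Int) = n := Int.toNat_of_nonneg (by omega)
  have hk1 : 1 ≤ k := by omega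
  have hkL : k ≤ s.length := by omega
  set mid := (k - 1) / 2 with hmid
  have hmidc : PySem.Int.truncdiv (n - 1) 2 = (mid : Int) := by
    rw [show n - 1 = ((k - 1 : Nat) : Int) from by omega]
    unfold PySem.Int.truncdiv
    rw [Int.tdiv_eq_ediv_of_nonneg (by positivity), hmid]
    exact_mod_cast (Int.natCast_div (k - 1) 2).symm
  simp only [hmidc]
  set d := k - mid - 1 with hd
  rw [show n = ((mid + 1 : Nat) : Int) + ((d : Nat) : Int) from by push_cast; omega]
  rw [show ((some s, (0 : Int)) : Option (List Int) × Int) = (some s, ((0 : Nat) : Int)) from by norm_num]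
  rw [pv_left s mid s 0 (by omega) (by omega)]
  set E := (List.range (mid + 1)).map (fun j => s.getD (0 + 2 * (mid - j)) 0) with hE
  have hElen : E.length = mid + 1 := by simp [hE]
  set a1 := E ++ s.drop (mid + 1) with ha1
  have ha1len : a1.length = s.length := by
    simp only [ha1, List.length_append, List.length_drop, hElen]
    omega
  show (List.foldl (pvWrite s) (some a1, ((1 : Nat) : Int))
        (PySem.List.pyRange ((mid + 1 : Nat) : Int) (((mid + 1 : Nat) : Int) + ((d : Nat) : Int)) 1)).1.getD []
      = pvE s k ++ pvO s k ++ List.drop k s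
  rw [pv_right s d (mid + 1) a1 1 (by omega) (by omega)]
  show a1.take (mid + 1) ++ (List.range d).map (fun j => s.getD (1 + 2 * j) 0) ++ a1.drop (mid + 1 + d)
      = pvE s k ++ pvO s k ++ List.drop k s
  have htk : a1.take (mid + 1) = E := List.take_left' hElen
  have hdr : a1.drop (mid + 1 + d) = s.drop k := by
    rw [ha1, List.drop_append, show mid + 1 + d - E.length = d from by omega,
        List.drop_eq_nil_of_le (by omega), List.nil_append, List.drop_drop]
    congr 1
    omega
  rw [htk, hdr]
  congr 1
  congr 1
  · rw [hE]
    unfold pvE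
    rw [← hmid]
    apply List.map_congr_left
    intro j _
    rw [show 0 + 2 * (mid - j) = 2 * (mid - j) from by omega]

lemma pv_B_pos (arr : List Int) (n : Int) (h1 : 1 ≤ n) (h2 : n ≤ (arr.length : Int)) :
    pendulumArrangement_alt arr n =
      pvE (PySem.List.sorted arr (fun x => x) false) n.toNat ++
      pvO (PySem.List.sorted arr (fun x => x) false) n.toNat ++
      (PySem.List.sorted arr (fun x => x) false).drop n.toNat := by
  simp only [pendulumArrangement_alt]
  set s := PySem.List.sorted arr (fun x => x) false with hs
  have hL : s.length = arr.length := PySem.List.length_sorted arr _ _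
  set k := n.toNat with hk
  have hkn : (k : Int) = n := Int.toNat_of_nonneg (by omega)
  have hk1 : 1 ≤ k := by omega
  have hkL : k ≤ s.length := by omega
  rw [show max n 0 = n from by omega]
  rw [PySem.List.slice_to s (by omega), PySem.List.slice_from s (by omega)]
  have hhead : (s.take n.toNat).length = k := by
    simp only [List.length_take]
    omega
  rw [pv_foldB (s.take n.toNat) 0 [] [] le_rfl (by decide)]
  simp only [List.nil_append, PySem.List.slice?_none_none_neg_one, Option.getD_some]
  rw [pv_evens_eq, pv_odds_eq, hhead]
  congr 1
  congr 1
  · rw [pv_rev_map_range]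
    unfold pvE
    rw [show (k + 1) / 2 = (k - 1) / 2 + 1 from by omega]
    apply List.map_congr_left
    intro j hj
    rw [List.mem_range] at hj
    rw [pv_getD_take _ _ _ _ (by omega)]
    rw [show (k - 1) / 2 + 1 - 1 - j = (k - 1) / 2 - j from by omega]
  · unfold pvO
    rw [show k / 2 = k - (k - 1) / 2 - 1 from by omega]
    apply List.map_congr_left
    intro j hj
    rw [List.mem_range] at hj
    rw [pv_getD_take _ _ _ _ (by omega)]
    rw [show 2 * j + 1 = 1 + 2 * j from by omega]

lemma pv_A_nonpos (arr : List Int) (n : Int) (hn : n ≤ 0) (hz : n = 0 → arr ≠ []) :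
    pendulumArrangement arr n = PySem.List.sorted arr (fun x => x) false := by
  simp only [pendulumArrangement]
  set s := PySem.List.sorted arr (fun x => x) false with hs
  rcases eq_or_lt_of_le hn with h0 | hneg
  · -- n = 0: mid = 0, the left loop writes arr[0] = tempArr[0] (a no-op), the right loop is empty
    subst h0
    have hne : s ≠ [] := by
      intro h
      refine hz rfl (List.length_eq_zero_iff.mp ?_)
      have hl := PySem.List.length_sorted arr (fun x : Int => x) false
      rw [← hs, h] at hl
      exact hl.symm
    have hlen : 0 < s.length := List.length_pos_iff.mpr hne
    rw [show PySem.Int.truncdiv ((0 : Int) - 1) 2 = ((0 : Nat) : Int) from by decide]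
    rw [show ((some s, (0 : Int)) : Option (List Int) × Int) = (some s, ((0 : Nat) : Int)) from by norm_num]
    rw [pv_left s 0 s 0 (by omega) hlen]
    rw [show ((0 : Nat) : Int) + 1 = 1 from by norm_num, PySem.List.pyRange_one_eq_nil (by omega)]
    obtain ⟨x, xs, hxs⟩ := List.exists_cons_of_ne_nil hne
    simp [hxs]
  · -- n < 0: both loops are empty
    have hmid : PySem.Int.truncdiv (n - 1) 2 ≤ -1 ∧ n - 1 ≤ PySem.Int.truncdiv (n - 1) 2 := by
      unfold PySem.Int.truncdiv
      rw [show n - 1 = -(1 - n) from by ring, Int.neg_tdiv, Int.tdiv_eq_ediv_of_nonneg (by omega)]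
      omega
    rw [PySem.List.pyRange_neg_one_eq_nil (by omega), PySem.List.pyRange_one_eq_nil (by omega)]
    simp

lemma pv_B_nonpos (arr : List Int) (n : Int) (hn : n ≤ 0) :
    pendulumArrangement_alt arr n = PySem.List.sorted arr (fun x => x) false := by
  simp only [pendulumArrangement_alt]
  rw [show max n 0 = 0 from by omega]
  rw [PySem.List.slice_to _ le_rfl, PySem.List.slice_from _ le_rfl]
  simp [PySem.List.enumerate_nil, PySem.List.slice?_none_none_neg_one]

-- ===== VERDICT (by name: the statement is the Claim_ definition above) =====
theorem pendulumArrangement_spec : Claim_equal_pendulumArrangement := by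
  intro arr n _ hpre
  obtain ⟨h1, h2⟩ := hpre
  unfold Spec_pendulumArrangement
  by_cases hn : n ≤ 0
  · rw [pv_A_nonpos arr n hn h2, pv_B_nonpos arr n hn]
  · rw [pv_A_pos arr n (by omega) h1, pv_B_pos arr n (by omega) h1]
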